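-- pv_equiv track=rewrite | github.com/isaacmartin1/advent-of-code | 2024/day12/part1.py | get_letter_coords
-- ===== SOURCE A (Python) =====
-- def get_letter_coords(graph):
--     dict = {}
--     for y in range(len(graph)):
--         for x in range(len(graph[0])):
--             if graph[y][x] in dict.keys():
--                 dict[graph[y][x]].append([x, y])
--             else:
--                 dict[graph[y][x]] = [[x, y]]
--     return dict
-- ===== SOURCE B (Python) =====
-- def get_letter_coords(graph):
--     # Build the flat row-major list of (letter, [x, y]) entries once,
--     # then group: distinct letters in first-occurrence order, one filter per letter.
--     entries = [(graph[y][x], [x, y]) for y in range(len(graph)) for x in range(len(graph[0]))]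
--     letters = list(dict.fromkeys(ch for ch, _ in entries))
--     return {ch: [c for d, c in entries if d == ch] for ch in letters}
-- ===== Notes on version B (the rewrite author's own statement) =====
-- stated objective: alternative
-- what changed: Replaces the incremental dict-building loop (membership test then append-or-create per cell) by a flatten-then-group pipeline: one flat row-major entry list, an ordered dedup of the letters, and one filter pass per distinct letter.
import Mathlib
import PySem

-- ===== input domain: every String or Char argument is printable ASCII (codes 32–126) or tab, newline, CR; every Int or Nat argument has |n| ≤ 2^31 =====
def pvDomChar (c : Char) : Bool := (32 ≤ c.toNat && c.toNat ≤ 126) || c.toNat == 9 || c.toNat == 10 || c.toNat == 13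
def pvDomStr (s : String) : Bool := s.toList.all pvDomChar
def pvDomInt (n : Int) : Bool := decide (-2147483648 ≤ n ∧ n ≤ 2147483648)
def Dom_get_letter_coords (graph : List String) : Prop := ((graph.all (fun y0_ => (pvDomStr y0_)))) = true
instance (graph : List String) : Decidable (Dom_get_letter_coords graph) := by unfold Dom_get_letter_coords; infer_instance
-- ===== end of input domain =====

-- B replaces the incremental dict-building loop by a flatten–dedup–filter grouping pipeline (alternative decomposition, same results).

-- ===== PORT A =====
-- graph[y][x] as a 1-character string (Python string indexing yields a str)
def pvCell (graph : List String) (y x : Int) : String :=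
  String.ofList [PySem.List.pyGetD (PySem.List.pyGetD graph y "").toList x ' ']

def get_letter_coords (graph : List String) : List (String × List (List Int)) :=
  ((PySem.List.pyRange 0 graph.length 1).foldl (fun d y =>
    (PySem.List.pyRange 0 (PySem.Str.len (PySem.List.pyGetD graph 0 "")) 1).foldl (fun d x =>
      if d.contains (pvCell graph y x) then d.modify (pvCell graph y x) [] (fun l => l ++ [[x, y]])
      else d.insert (pvCell graph y x) [[x, y]]) d) PySem.Dict.empty).items

-- ===== PORT B =====
-- Source B's flat row-major entry list [(graph[y][x], [x, y]) …]
def pvEntries (graph : List String) : List (String × List Int) :=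
  (PySem.List.pyRange 0 graph.length 1).flatMap (fun y =>
    (PySem.List.pyRange 0 (PySem.Str.len (PySem.List.pyGetD graph 0 "")) 1).map (fun x =>
      (pvCell graph y x, [x, y])))

def get_letter_coords_alt (graph : List String) : List (String × List (List Int)) :=
  (PySem.List.dedup ((pvEntries graph).map (fun e => e.1))).map
    (fun ch => (ch, ((pvEntries graph).filter (fun e => e.1 == ch)).map (fun e => e.2)))

-- ===== PRECONDITION & SPEC =====
-- Pre_ excludes exactly the ragged grids on which Python A raises IndexError: a nonempty graph
-- with some row shorter than the first row (graph[y][x] fails there); the empty grid stays inside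
-- Pre_ (A's loop never runs and it returns {}, which B matches).
def Pre_get_letter_coords (graph : List String) : Prop :=
  ∀ row ∈ graph, PySem.Str.len (graph.headD "") ≤ PySem.Str.len row
instance (graph : List String) : Decidable (Pre_get_letter_coords graph) := by unfold Pre_get_letter_coords; infer_instance
def pvWitness_get_letter_coords : List String := ["ab", "ba"]
def Spec_get_letter_coords (graph : List String) (out : List (String × List (List Int))) : Prop := out = get_letter_coords_alt graph
instance (graph : List String) (out : List (String × List (List Int))) : Decidable (Spec_get_letter_coords graph out) := by unfold Spec_get_letter_coords; infer_instance

-- ===== CLAIM (what is proved, stated in full; the proofs are below) =====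
def Claim_equal_get_letter_coords : Prop := ∀ (graph : List String), Dom_get_letter_coords graph → Pre_get_letter_coords graph → Spec_get_letter_coords graph (get_letter_coords graph)

-- ===== LEMMAS AND PROOFS =====

-- A's per-cell branch (append if present, create if absent) is exactly a modify with default [].
theorem step_eq_modify (d : PySem.Dict String (List (List Int))) (c : String) (v : List Int) :
    (if d.contains c then d.modify c [] (fun l => l ++ [v]) else d.insert c [v])
      = d.modify c [] (fun l => l ++ [v]) := by
  by_cases h : d.contains c
  · simp [h]
  · have h' : d.contains c = false := by simp [h]
    simp [h, PySem.Dict.modify, PySem.Dict.getD_of_not_contains d [] h']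

-- Grouping a flat entry list with A's fold equals B's dedup-then-filter grouping.
theorem items_group_fold (es : List (String × List Int)) :
    (es.foldl (fun d p =>
        if d.contains p.1 then d.modify p.1 [] (fun l => l ++ [p.2]) else d.insert p.1 [p.2])
      PySem.Dict.empty).items
    = (PySem.List.dedup (es.map (fun e => e.1))).map
        (fun ch => (ch, (es.filter (fun e => e.1 == ch)).map (fun e => e.2))) := by
  have hstep : (fun (d : PySem.Dict String (List (List Int))) (p : String × List Int) =>
      if d.contains p.1 then d.modify p.1 [] (fun l => l ++ [p.2]) else d.insert p.1 [p.2])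
      = (fun d p => d.modify p.1 [] (fun l => l ++ [p.2])) := by
    funext d p; exact step_eq_modify d p.1 p.2
  rw [hstep]
  have hnd : (es.foldl (fun d p => d.modify p.1 [] (fun l => l ++ [p.2]))
      (PySem.Dict.empty : PySem.Dict String (List (List Int)))).keys.Nodup :=
    PySem.Dict.nodup_keys_foldl_modify_key es (fun p => p.1) [] (fun _ p => fun l => l ++ [p.2])
      PySem.Dict.empty (by simp)
  rw [PySem.Dict.items_eq_map_keys _ hnd [],
      PySem.Dict.keys_foldl_modify_key es (fun p => p.1) [] (fun _ p => fun l => l ++ [p.2])]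
  simp only [PySem.Dict.keys_empty, PySem.List.dedup_eq_ofList]
  apply List.map_congr_left
  intro k _
  rw [PySem.Dict.getD_foldl_modify_append]
  simp [PySem.Dict.getD_empty]

-- ===== VERDICT (by name: the statement is the Claim_ definition above) =====
theorem get_letter_coords_spec : Claim_equal_get_letter_coords := by
  intro graph _ _
  unfold Spec_get_letter_coords get_letter_coords get_letter_coords_alt
  rw [← items_group_fold (pvEntries graph)]
  unfold pvEntries
  rw [List.foldl_flatMap]
  simp only [List.foldl_map]
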